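-- pv_equiv track=rewrite | github.com/Morgan-DD/GenerateShema | createShema.py | getItemIdByLine
-- ===== SOURCE A (Python) =====
-- def getItemIdByLine(idLineSearch, idItemSearch, matrix):
--     idLine = 0
--     idItem = 0
--     idItemTotal = 0
--     for line in matrix:
--         for item in line:
--             if(int(idLine) == int(idLineSearch) and int(idItem) == int(idItemSearch)):
--                 return idItemTotal
--             idItemTotal=idItemTotal+1
--             idItem=idItem+1
--         idLine=idLine+1
--     return -1
-- ===== SOURCE B (Python) =====
-- def getItemIdByLine(idLineSearch, idItemSearch, matrix):
--     # A never resets its per-line item counter, so its counter equals the flat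
--     # index throughout; it returns idItemSearch exactly when idItemSearch falls
--     # in the flat-index range covered by line idLineSearch, else -1.
--     if not (0 <= idLineSearch < len(matrix)):
--         return -1
--     prefix = sum(len(line) for line in matrix[:idLineSearch])
--     if prefix <= idItemSearch < prefix + len(matrix[idLineSearch]):
--         return idItemSearch
--     return -1
-- ===== Notes on version B (the rewrite author's own statement) =====
-- stated objective: faster
-- what changed: Replaced the item-by-item nested scan with a bounds check plus a prefix sum of line lengths: since A never resets its per-line counter, it returns idItemSearch iff idItemSearch lies in the flat-index range of line idLineSearch, which B computes directly in O(lines) length arithmetic instead of O(total items).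
import Mathlib
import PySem

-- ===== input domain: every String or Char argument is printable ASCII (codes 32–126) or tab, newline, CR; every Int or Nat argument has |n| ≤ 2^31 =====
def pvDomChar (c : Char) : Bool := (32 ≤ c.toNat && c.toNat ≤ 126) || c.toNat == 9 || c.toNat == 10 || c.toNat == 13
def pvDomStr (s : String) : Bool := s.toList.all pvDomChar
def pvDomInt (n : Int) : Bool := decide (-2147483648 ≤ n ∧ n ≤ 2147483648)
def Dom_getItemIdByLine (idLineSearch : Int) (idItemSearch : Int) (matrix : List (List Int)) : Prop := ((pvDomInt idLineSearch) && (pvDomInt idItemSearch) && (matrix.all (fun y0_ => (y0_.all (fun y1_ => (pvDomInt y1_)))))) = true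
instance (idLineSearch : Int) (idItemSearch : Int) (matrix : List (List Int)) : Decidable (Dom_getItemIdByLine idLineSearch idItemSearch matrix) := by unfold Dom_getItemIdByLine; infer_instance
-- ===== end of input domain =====

-- B replaces A's item-by-item nested scan by a bounds check plus a prefix sum of line
-- lengths (A's per-line counter is never reset, so it equals the flat counter).

-- ===== PORT A =====
-- inner 'for item in line' loop: either an early return (.inl) or the updated
-- (idItem, idItemTotal) state (.inr).  int(x) on an int is the identity.
def pvInnerA (idLineSearch idItemSearch idLine : Int) :
    List Int → Int → Int → Sum Int (Int × Int)
  | [], idItem, idItemTotal => Sum.inr (idItem, idItemTotal)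
  | _ :: rest, idItem, idItemTotal =>
      if idLine = idLineSearch ∧ idItem = idItemSearch then Sum.inl idItemTotal
      else pvInnerA idLineSearch idItemSearch idLine rest (idItem + 1) (idItemTotal + 1)

-- outer 'for line in matrix' loop
def pvOuterA (idLineSearch idItemSearch : Int) :
    List (List Int) → Int → Int → Int → Int
  | [], _, _, _ => -1
  | line :: rest, idLine, idItem, idItemTotal =>
      match pvInnerA idLineSearch idItemSearch idLine line idItem idItemTotal with
      | Sum.inl r => r
      | Sum.inr (idItem', idItemTotal') =>
          pvOuterA idLineSearch idItemSearch rest (idLine + 1) idItem' idItemTotal'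

def getItemIdByLine (idLineSearch : Int) (idItemSearch : Int) (matrix : List (List Int)) : Int :=
  pvOuterA idLineSearch idItemSearch matrix 0 0 0

-- ===== PORT B =====
-- matrix[:idLineSearch] is 'take' and matrix[idLineSearch] is 'getD' here because the
-- guard guarantees 0 ≤ idLineSearch < len(matrix) (the default [] is never used).
def getItemIdByLine_alt (idLineSearch : Int) (idItemSearch : Int) (matrix : List (List Int)) : Int :=
  if 0 ≤ idLineSearch ∧ idLineSearch < (matrix.length : Int) then
    let pref : Int := ((matrix.take idLineSearch.toNat).map (fun l => (l.length : Int))).sum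
    if pref ≤ idItemSearch ∧ idItemSearch < pref + ((matrix.getD idLineSearch.toNat []).length : Int) then
      idItemSearch
    else -1
  else -1

-- ===== PRECONDITION & SPEC =====
def Spec_getItemIdByLine (idLineSearch : Int) (idItemSearch : Int) (matrix : List (List Int)) (out : Int) : Prop := out = getItemIdByLine_alt idLineSearch idItemSearch matrix
instance (idLineSearch : Int) (idItemSearch : Int) (matrix : List (List Int)) (out : Int) : Decidable (Spec_getItemIdByLine idLineSearch idItemSearch matrix out) := by unfold Spec_getItemIdByLine; infer_instance

-- ===== CLAIM (what is proved, stated in full; the proofs are below) =====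
def Claim_equal_getItemIdByLine : Prop := ∀ (idLineSearch : Int) (idItemSearch : Int) (matrix : List (List Int)), Dom_getItemIdByLine idLineSearch idItemSearch matrix → Spec_getItemIdByLine idLineSearch idItemSearch matrix (getItemIdByLine idLineSearch idItemSearch matrix)

-- ===== LEMMAS AND PROOFS =====

-- inner loop started with idItem = idItemTotal = c
theorem pvInnerA_eq (L S ℓ : Int) (line : List Int) :
    ∀ c : Int, pvInnerA L S ℓ line c c =
      if ℓ = L ∧ c ≤ S ∧ S < c + (line.length : Int) then Sum.inl S
      else Sum.inr (c + (line.length : Int), c + (line.length : Int)) := by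
  induction line with
  | nil =>
      intro c
      simp only [pvInnerA, List.length_nil, Nat.cast_zero]
      rw [if_neg (by rintro ⟨_, h2, h3⟩; omega)]
      norm_num
  | cons x rest ih =>
      intro c
      simp only [pvInnerA]
      by_cases hm : ℓ = L ∧ c = S
      · rw [if_pos hm]
        rw [if_pos (show ℓ = L ∧ c ≤ S ∧ S < c + ((x :: rest).length : Int) by
          refine ⟨hm.1, le_of_eq hm.2, ?_⟩; simp only [List.length_cons]; omega)]
        rw [hm.2]
      · rw [if_neg hm, ih (c + 1)]
        simp only [List.length_cons]
        by_cases h1 : ℓ = L ∧ c + 1 ≤ S ∧ S < c + 1 + (rest.length : Int)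
        · rw [if_pos h1, if_pos ⟨h1.1, by omega, by push_cast; omega⟩]
        · rw [if_neg h1]
          rw [if_neg (by
            rintro ⟨hL, hle, hlt⟩
            push_cast at hlt
            by_cases hc : c = S
            · exact hm ⟨hL, hc⟩
            · exact h1 ⟨hL, by omega, by omega⟩)]
          push_cast
          norm_num
          omega

-- once idLine has passed idLineSearch the result is -1
theorem pvOuterA_past (L S : Int) (m : List (List Int)) :
    ∀ ℓ c : Int, L < ℓ → pvOuterA L S m ℓ c c = -1 := by
  induction m with
  | nil => intro ℓ c _; simp [pvOuterA]
  | cons line rest ih =>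
      intro ℓ c h
      simp only [pvOuterA]
      rw [pvInnerA_eq, if_neg (by rintro ⟨hh, _⟩; omega)]
      exact ih (ℓ + 1) (c + line.length) (by omega)

-- main invariant: outer loop from line ℓ with flat counter c
theorem pvOuterA_eq (L S : Int) (m : List (List Int)) :
    ∀ ℓ c : Int, ℓ ≤ L → pvOuterA L S m ℓ c c =
      (if L - ℓ < (m.length : Int) ∧
          c + ((m.take (L - ℓ).toNat).map (fun l => (l.length : Int))).sum ≤ S ∧
          S < c + ((m.take (L - ℓ).toNat).map (fun l => (l.length : Int))).sum
              + ((m.getD (L - ℓ).toNat []).length : Int)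
       then S else -1) := by
  induction m with
  | nil =>
      intro ℓ c _
      simp only [pvOuterA, List.length_nil, Nat.cast_zero]
      rw [if_neg (by rintro ⟨h1, _⟩; omega)]
  | cons line rest ih =>
      intro ℓ c hle
      simp only [pvOuterA]
      rw [pvInnerA_eq]
      by_cases hL : ℓ = L
      · subst hL
        have hk : (ℓ - ℓ).toNat = 0 := by omega
        rw [hk]
        have hsum : (((line :: rest).take 0).map (fun l => (l.length : Int))).sum = 0 := rfl
        have hget : (line :: rest).getD 0 [] = line := rfl
        rw [hsum, hget]
        by_cases hin : c ≤ S ∧ S < c + (line.length : Int)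
        · rw [if_pos ⟨rfl, hin⟩]
          show S = _
          rw [if_pos ⟨by simp only [List.length_cons]; push_cast; omega, by omega, by omega⟩]
        · rw [if_neg (by rintro ⟨_, h2, h3⟩; exact hin ⟨h2, h3⟩)]
          show pvOuterA ℓ S rest (ℓ + 1) (c + (line.length : Int)) (c + (line.length : Int)) = _
          rw [pvOuterA_past ℓ S rest (ℓ + 1) (c + line.length) (by omega)]
          rw [if_neg (by rintro ⟨_, h2, h3⟩; exact hin ⟨by omega, by omega⟩)]
      · have hlt : ℓ < L := lt_of_le_of_ne hle hL
        rw [if_neg (by rintro ⟨hh, _⟩; exact hL hh)]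
        show pvOuterA L S rest (ℓ + 1) (c + (line.length : Int)) (c + (line.length : Int)) = _
        rw [ih (ℓ + 1) (c + line.length) (by omega)]
        have hk : (L - ℓ).toNat = (L - (ℓ + 1)).toNat + 1 := by omega
        rw [hk]
        have hsum : (((line :: rest).take ((L - (ℓ + 1)).toNat + 1)).map (fun l => (l.length : Int))).sum
            = (line.length : Int) + ((rest.take (L - (ℓ + 1)).toNat).map (fun l => (l.length : Int))).sum := by
          simp [List.take_succ_cons]
        have hget : (line :: rest).getD ((L - (ℓ + 1)).toNat + 1) [] = rest.getD (L - (ℓ + 1)).toNat [] := by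
          simp [List.getD]
        rw [hsum, hget]
        simp only [List.length_cons]
        generalize ((rest.take (L - (ℓ + 1)).toNat).map (fun l => (l.length : Int))).sum = t
        push_cast
        split_ifs with h1 h2 h2 <;> first | rfl | omega

-- ===== VERDICT (by name: the statement is the Claim_ definition above) =====
theorem getItemIdByLine_spec : Claim_equal_getItemIdByLine := by
  intro L S m _
  unfold Spec_getItemIdByLine getItemIdByLine getItemIdByLine_alt
  by_cases h0 : 0 ≤ L ∧ L < (m.length : Int)
  · rw [pvOuterA_eq L S m 0 0 h0.1, if_pos h0]
    have hz : L - 0 = L := by omega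
    rw [hz]
    generalize ((m.take L.toNat).map (fun l => (l.length : Int))).sum = t
    dsimp only
    split_ifs with h1 h2 h2 <;> first | rfl | omega
  · rw [if_neg h0]
    by_cases hneg : L < 0
    · exact pvOuterA_past L S m 0 0 hneg
    · rw [pvOuterA_eq L S m 0 0 (by omega)]
      rw [if_neg (by rintro ⟨h1, _⟩; omega)]
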